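-- pv_equiv track=rewrite | github.com/jramaswami/Binary_Search_Python | longest_alliteration.py | solve
-- ===== SOURCE A (Python) =====
-- def solve(words):
--     soln = 0
--     current_alliteration = ""
--     current_length = 0
--     for word in words:
--         if word[0] == current_alliteration:
--             current_length += 1
--         else:
--             soln = max(soln, current_length)
--             current_alliteration = word[0]
--             current_length = 1
--     soln = max(soln, current_length)
--     return soln
-- ===== SOURCE B (Python) =====
-- def _seg(keys, lo, hi):
--     # (first_key, prefix_run, best_run, suffix_run, last_key) of keys[lo:hi]
--     if hi - lo == 1:
--         k = keys[lo]
--         return (k, 1, 1, 1, k)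
--     mid = (lo + hi) // 2
--     fL, pL, bL, sL, lL = _seg(keys, lo, mid)
--     fR, pR, bR, sR, lR = _seg(keys, mid, hi)
--     lenL, lenR = mid - lo, hi - mid
--     best = max(bL, bR)
--     pref, suff = pL, sR
--     if lL == fR:
--         best = max(best, sL + pR)
--         if pL == lenL and fL == fR:
--             pref = lenL + pR
--         if sR == lenR and lL == lR:
--             suff = lenR + sL
--     return (fL, pref, best, suff, lR)
--
--
-- def solve(words):
--     # Divide and conquer: split in half, combine (first, prefix-run, best,
--     # suffix-run, last) summaries across the midpoint.
--     keys = [w[0] for w in words]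
--     if not keys:
--         return 0
--     return _seg(keys, 0, len(keys))[2]
-- ===== Notes on version B (the rewrite author's own statement) =====
-- stated objective: alternative
-- what changed: Replaces A's left-to-right streaming state machine with a divide-and-conquer recursion that splits the word list at the midpoint, summarises each half as (first key, prefix run, best run, suffix run, last key) and merges the summaries across the boundary.
import Mathlib
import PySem

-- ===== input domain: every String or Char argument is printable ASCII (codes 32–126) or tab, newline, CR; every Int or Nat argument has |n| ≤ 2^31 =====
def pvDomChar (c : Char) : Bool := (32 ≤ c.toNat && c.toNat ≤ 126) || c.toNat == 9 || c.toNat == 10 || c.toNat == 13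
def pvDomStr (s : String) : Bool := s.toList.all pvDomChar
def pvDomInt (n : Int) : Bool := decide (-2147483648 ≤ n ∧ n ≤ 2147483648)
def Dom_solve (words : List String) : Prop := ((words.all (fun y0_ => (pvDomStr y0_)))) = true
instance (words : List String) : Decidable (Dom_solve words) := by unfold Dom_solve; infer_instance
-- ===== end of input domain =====

-- B replaces A's streaming state machine by a divide-and-conquer recursion on halves
-- with (first, prefix-run, best, suffix-run, last) summaries; equivalence is about the return value.

-- ===== PORT A =====
-- A's current_alliteration starts as "" and otherwise holds word[0] (a 1-char string);
-- modelled as Option Char: none = "", some c = that 1-char string (exact: "" never equals a 1-char string).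
def solveStep (st : Int × Option Char × Int) (word : String) : Int × Option Char × Int :=
  match PySem.Str.pyGet? word 0 with
  | some c =>
      if some c = st.2.1 then (st.1, st.2.1, st.2.2 + 1)
      else (max st.1 st.2.2, some c, 1)
  | none => st      -- word[0] raises IndexError in Python; excluded by Pre_solve

def solve (words : List String) : Int :=
  let st := words.foldl solveStep (0, none, 0)
  max st.1 st.2.2

-- ===== PORT B =====
-- keys = [w[0] for w in words]; getD's default is arbitrary: w[0] raises there (excluded by Pre_solve)
def firstKey (w : String) : Char := (PySem.Str.pyGet? w 0).getD ' '

-- the merge in _seg's body: combine the summaries of the two halves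
def segMerge (L R : Char × Nat × Int × Nat × Char) (lenL lenR : Nat) : Char × Nat × Int × Nat × Char :=
  match L, R with
  | (fL, pL, bL, sL, lL), (fR, pR, bR, sR, lR) =>
    let best := max bL bR
    if lL = fR then
      ( fL,
        (if pL = lenL ∧ fL = fR then lenL + pR else pL),
        max best ((sL : Int) + (pR : Int)),
        (if sR = lenR ∧ lL = lR then lenR + sL else sR),
        lR )
    else (fL, pL, best, sR, lR)

-- _seg on the sublist keys[lo:hi] (segments carried as lists; midpoint split = take/drop len/2)
def seg : List Char → Option (Char × Nat × Int × Nat × Char)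
  | [] => none          -- _seg is never called on an empty segment
  | [c] => some (c, 1, 1, 1, c)
  | a :: b :: t =>
    let ks := a :: b :: t
    let m := ks.length / 2
    match seg (ks.take m), seg (ks.drop m) with
    | some L, some R => some (segMerge L R m (ks.length - m))
    | _, _ => none
termination_by ks => ks.length
decreasing_by all_goals (simp [List.length_take]; omega)

def solve_alt (words : List String) : Int :=
  match seg (words.map firstKey) with
  | none => 0                       -- 'if not keys: return 0'
  | some (_, _, b, _, _) => b       -- _seg(keys, 0, len(keys))[2]

-- ===== PRECONDITION & SPEC =====
-- Pre_ excludes lists containing an empty word: there Python A (and B) raise IndexError on word[0].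
def Pre_solve (words : List String) : Prop := ∀ w ∈ words, w ≠ ""
instance (words : List String) : Decidable (Pre_solve words) := by unfold Pre_solve; infer_instance
def pvWitness_solve : List String := (["apple", "ant", "bee"])

def Spec_solve (words : List String) (out : Int) : Prop := out = solve_alt words
instance (words : List String) (out : Int) : Decidable (Spec_solve words out) := by unfold Spec_solve; infer_instance

-- ===== CLAIM (what is proved, stated in full; the proofs are below) =====
def Claim_equal_solve : Prop := ∀ (words : List String), Dom_solve words → Pre_solve words → Spec_solve words (solve words)

-- ===== LEMMAS AND PROOFS =====

-- the char-level step A performs on a nonempty word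
def stepC (st : Int × Option Char × Int) (c : Char) : Int × Option Char × Int :=
  if some c = st.2.1 then (st.1, st.2.1, st.2.2 + 1)
  else (max st.1 st.2.2, some c, 1)

-- pure value of A's loop from state (·, cur, l), ignoring the soln component
def g (cur : Option Char) (l : Int) : List Char → Int
  | [] => l
  | c :: ks => if some c = cur then g cur (l + 1) ks else max l (g (some c) 1 ks)

-- length of the maximal equal-to-c prefix
def leadCount (c : Char) : List Char → Nat
  | [] => 0
  | d :: ks => if d = c then leadCount c ks + 1 else 0

-- reference value: maximum run length, eating one maximal run at a time
def M (ks : List Char) : Int :=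
  match ks with
  | [] => 0
  | c :: rest => max (1 + (leadCount c rest : Int)) (M (rest.drop (leadCount c rest)))
termination_by ks.length
decreasing_by simp

def prefRun : List Char → Nat
  | [] => 0
  | c :: ks => 1 + leadCount c ks

def suffRun (ks : List Char) : Nat := prefRun ks.reverse

lemma M_nil : M [] = 0 := by simp [M]

lemma M_cons (c : Char) (rest : List Char) :
    M (c :: rest) = max (1 + (leadCount c rest : Int)) (M (rest.drop (leadCount c rest))) := by
  rw [M]

lemma M_nonneg (ks : List Char) : 0 ≤ M ks := by
  fun_induction M ks with
  | case1 => omega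
  | case2 c rest ih => omega

lemma leadCount_le_length (c : Char) (ks : List Char) : leadCount c ks ≤ ks.length := by
  induction ks with
  | nil => simp [leadCount]
  | cons d ks ih => by_cases h : d = c <;> simp [leadCount, h] <;> omega

lemma leadCount_eq_length_iff (c : Char) (ks : List Char) :
    leadCount c ks = ks.length ↔ ks.all (· = c) := by
  induction ks with
  | nil => simp [leadCount]
  | cons d ks ih =>
    by_cases h : d = c
    · simpa [leadCount, h] using ih
    · simp [leadCount, h]

lemma leadCount_append (c : Char) (l r : List Char) :
    leadCount c (l ++ r) =
      if l.all (· = c) then l.length + leadCount c r else leadCount c l := by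
  induction l with
  | nil => simp [leadCount]
  | cons d l ih =>
    by_cases h : d = c
    · simp [leadCount, h, ih]
      split_ifs <;> omega
    · simp [leadCount, h]

lemma headI_drop_leadCount (c : Char) (ks : List Char)
    (h : ks.drop (leadCount c ks) ≠ []) : (ks.drop (leadCount c ks)).headI ≠ c := by
  induction ks with
  | nil => simp [leadCount] at h
  | cons d ks ih =>
    by_cases hd : d = c
    · simpa [leadCount, hd] using ih (by simpa [leadCount, hd] using h)
    · simpa [leadCount, hd] using hd

lemma all_headI (c : Char) (ks : List Char) (hne : ks ≠ []) (h : ks.all (· = c)) :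
    ks.headI = c := by
  cases ks with
  | nil => exact absurd rfl hne
  | cons d ks => simp_all

lemma headI_append (l r : List Char) (hl : l ≠ []) : (l ++ r).headI = l.headI := by
  cases l with
  | nil => exact absurd rfl hl
  | cons c t => simp

lemma headI_reverse (ks : List Char) : ks.reverse.headI = ks.getLastI := by
  induction ks using List.reverseRecOn with
  | nil => rfl
  | append_singleton l a ih =>
    rw [List.reverse_append, List.getLastI_eq_getLast?_getD, List.getLast?_concat]
    simp

lemma getLastI_append (l r : List Char) (hr : r ≠ []) : (l ++ r).getLastI = r.getLastI := by
  rw [← headI_reverse, ← headI_reverse, List.reverse_append,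
      headI_append _ _ (by simpa using hr)]

lemma all_getLastI (c : Char) (ks : List Char) (hne : ks ≠ []) (h : ks.all (· = c)) :
    ks.getLastI = c := by
  rw [← headI_reverse]
  exact all_headI c ks.reverse (by simpa using hne) (by simpa using h)

lemma prefRun_eq_length_iff (ks : List Char) (hne : ks ≠ []) :
    prefRun ks = ks.length ↔ ks.all (· = ks.headI) := by
  cases ks with
  | nil => exact absurd rfl hne
  | cons c t =>
    simp only [prefRun, List.headI, List.length_cons, List.all_cons]
    constructor
    · intro h
      have : leadCount c t = t.length := by omega
      simpa [leadCount_eq_length_iff] using this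
    · intro h
      have : leadCount c t = t.length := by
        rw [leadCount_eq_length_iff]
        simpa using h
      omega

lemma prefRun_append (l r : List Char) (hl : l ≠ []) (hr : r ≠ []) :
    prefRun (l ++ r) =
      if prefRun l = l.length ∧ l.headI = r.headI then l.length + prefRun r
      else prefRun l := by
  cases l with
  | nil => exact absurd rfl hl
  | cons c t =>
    cases r with
    | nil => exact absurd rfl hr
    | cons d r' =>
      simp only [prefRun, List.cons_append, leadCount_append, List.length_cons, List.headI]
      by_cases ht : (t.all fun x => decide (x = c)) = true
      · have htl : leadCount c t = t.length := (leadCount_eq_length_iff c t).2 ht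
        rw [if_pos ht]
        by_cases hd : d = c
        · subst hd
          rw [if_pos ⟨by omega, rfl⟩]
          simp [leadCount]
          omega
        · rw [if_neg (by rintro ⟨-, h⟩; exact hd h.symm)]
          simp [leadCount, hd]
          omega
      · have hle := leadCount_le_length c t
        have htl : leadCount c t ≠ t.length := fun h => ht ((leadCount_eq_length_iff c t).1 h)
        rw [if_neg ht, if_neg (by rintro ⟨h, -⟩; omega)]

lemma suffRun_append (l r : List Char) (hl : l ≠ []) (hr : r ≠ []) :
    suffRun (l ++ r) =
      if suffRun r = r.length ∧ l.getLastI = r.getLastI then r.length + suffRun l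
      else suffRun r := by
  unfold suffRun
  rw [List.reverse_append,
      prefRun_append _ _ (by simpa using hr) (by simpa using hl),
      List.length_reverse, headI_reverse, headI_reverse]
  exact if_congr (and_congr_right fun _ => eq_comm) rfl rfl

lemma take_leadCount_all (c : Char) (ks : List Char) :
    (ks.take (leadCount c ks)).all (· = c) := by
  induction ks with
  | nil => simp [leadCount]
  | cons d ks ih =>
    by_cases hd : d = c
    · subst hd; simpa [leadCount] using ih
    · simp [leadCount, hd]

lemma suffRun_eq_length_iff (ks : List Char) (hne : ks ≠ []) :
    suffRun ks = ks.length ↔ ks.all (· = ks.getLastI) := by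
  unfold suffRun
  rw [← List.length_reverse, prefRun_eq_length_iff _ (by simpa using hne),
      headI_reverse, List.all_reverse]

-- the run-summary components are blind to everything left of the last incomplete run
lemma suffRun_cons_middle (c : Char) (t : List Char)
    (hrest : t.drop (leadCount c t) ≠ []) :
    suffRun (c :: t) = suffRun (t.drop (leadCount c t)) := by
  have hsplit : c :: t = (c :: t.take (leadCount c t)) ++ t.drop (leadCount c t) := by
    simp
  rw [hsplit, suffRun_append _ _ (by simp) hrest]
  rw [if_neg]
  rintro ⟨hall, hlast⟩
  have hall' := (suffRun_eq_length_iff _ hrest).1 hall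
  have h1 : (t.drop (leadCount c t)).headI = (t.drop (leadCount c t)).getLastI :=
    all_headI _ _ hrest hall'
  have h2 : (c :: t.take (leadCount c t)).getLastI = c := by
    apply all_getLastI c _ (by simp)
    simpa using take_leadCount_all c t
  have := headI_drop_leadCount c t hrest
  rw [h1, ← hlast, h2] at this
  exact this rfl

lemma M_append_aux (n : Nat) : ∀ (l r : List Char), l.length ≤ n → l ≠ [] → r ≠ [] →
    M (l ++ r) =
      if l.getLastI = r.headI
      then max (max (M l) (M r)) ((suffRun l : Int) + (prefRun r : Int))
      else max (M l) (M r) := by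
  induction n with
  | zero =>
    intro l r hlen hl _
    cases l with
    | nil => exact absurd rfl hl
    | cons c t => simp at hlen
  | succ n ih =>
    intro l r hlen hl hr
    cases l with
    | nil => exact absurd rfl hl
    | cons c t =>
      by_cases hrest : t.drop (leadCount c t) = []
      · -- the whole of l is one run of c
        have hkt : leadCount c t = t.length := by
          have h1 := leadCount_le_length c t
          have h2 := List.drop_eq_nil_iff.mp hrest
          omega
        have htall : (t.all fun x => decide (x = c)) = true :=
          (leadCount_eq_length_iff c t).1 hkt
        have hlall : ((c :: t).all fun x => decide (x = c)) = true := by simp [htall]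
        have hlast : (c :: t).getLastI = c := all_getLastI c _ (by simp) hlall
        have hsuffl : suffRun (c :: t) = t.length + 1 := by
          rw [show suffRun (c :: t) = (c :: t).length from
                (suffRun_eq_length_iff _ (by simp)).2 (by rw [hlast]; exact hlall)]
          simp
        have hMl : M (c :: t) = 1 + (t.length : Int) := by
          rw [M_cons, hrest, M_nil, hkt]; omega
        cases r with
        | nil => exact absurd rfl hr
        | cons d r' =>
          by_cases hd : d = c
          · subst hd
            have hlc : leadCount d (t ++ d :: r') = t.length + (1 + leadCount d r') := by
              rw [leadCount_append, if_pos htall]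
              simp [leadCount]
              omega
            rw [List.cons_append, M_cons, hlc,
                show (t ++ d :: r').drop (t.length + (1 + leadCount d r'))
                    = r'.drop (leadCount d r') from by
                  rw [List.drop_length_add_append, Nat.add_comm, List.drop_succ_cons],
                if_pos (by rw [hlast]; rfl), hMl, hsuffl, M_cons]
            have := M_nonneg (r'.drop (leadCount d r'))
            simp only [prefRun]
            push_cast
            omega
          · have hlc : leadCount c (t ++ d :: r') = t.length := by
              rw [leadCount_append, if_pos htall]
              simp [leadCount, hd]
            rw [List.cons_append, M_cons, hlc,
                show (t ++ d :: r').drop t.length = d :: r' from by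
                  simpa using List.drop_length_add_append (l := t) (n := 0) (l' := d :: r'),
                if_neg (by rw [hlast]; exact fun h => hd h.symm), hMl]
      · -- l's first run ends inside l; peel it and use the IH on the remainder
        have hkle := leadCount_le_length c t
        have hkne : leadCount c t ≠ t.length := by
          intro h
          exact hrest (List.drop_eq_nil_iff.mpr (by omega))
        have htall : ¬ ((t.all fun x => decide (x = c)) = true) := by
          intro h
          exact hkne ((leadCount_eq_length_iff c t).2 h)
        have hlc : leadCount c (t ++ r) = leadCount c t := by
          rw [leadCount_append, if_neg htall]
        have hdrop : (t ++ r).drop (leadCount c t) = t.drop (leadCount c t) ++ r :=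
          List.drop_append_of_le_length (by omega)
        have hlenrest : (t.drop (leadCount c t)).length ≤ n := by
          simp only [List.length_cons] at hlen
          rw [List.length_drop]
          omega
        have hih := ih (t.drop (leadCount c t)) r hlenrest hrest hr
        have hlastl : (c :: t).getLastI = (t.drop (leadCount c t)).getLastI := by
          rw [show c :: t = (c :: t.take (leadCount c t)) ++ t.drop (leadCount c t) from by simp,
              getLastI_append _ _ hrest]
        have hsuffl := suffRun_cons_middle c t hrest
        rw [List.cons_append, M_cons, hlc, hdrop, hih, M_cons (c := c) (rest := t), hlastl, hsuffl]
        by_cases hcond : (t.drop (leadCount c t)).getLastI = r.headI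
        · rw [if_pos hcond, if_pos hcond]
          have := M_nonneg (t.drop (leadCount c t))
          have := M_nonneg r
          omega
        · rw [if_neg hcond, if_neg hcond]
          omega

lemma M_append (l r : List Char) (hl : l ≠ []) (hr : r ≠ []) :
    M (l ++ r) =
      if l.getLastI = r.headI
      then max (max (M l) (M r)) ((suffRun l : Int) + (prefRun r : Int))
      else max (M l) (M r) := by
  exact M_append_aux l.length l r le_rfl hl hr

lemma seg_eq_aux (n : Nat) : ∀ ks : List Char, ks.length ≤ n → ks ≠ [] →
    seg ks = some (ks.headI, prefRun ks, M ks, suffRun ks, ks.getLastI) := by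
  induction n with
  | zero =>
    intro ks hlen hne
    cases ks with
    | nil => exact absurd rfl hne
    | cons a t => simp at hlen
  | succ n ih =>
    intro ks hlen hne
    match ks with
    | [] => exact absurd rfl hne
    | [c] =>
      have hM : M [c] = 1 := by rw [M_cons]; simp [leadCount, M_nil]
      simp [seg, prefRun, suffRun, leadCount, List.getLastI, hM]
    | a :: b :: t =>
      have hm2 : (a :: b :: t).length / 2 < (a :: b :: t).length := by simp; omega
      have hm1 : 1 ≤ (a :: b :: t).length / 2 := by simp; omega
      set ks' := a :: b :: t with hks
      set m := ks'.length / 2 with hm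
      set l := ks'.take m with hldef
      set r := ks'.drop m with hrdef
      have hlne : l ≠ [] := by
        have : l.length = m := by rw [hldef, List.length_take]; omega
        intro h; rw [h] at this; simp at this; omega
      have hrne : r ≠ [] := by
        have : r.length = ks'.length - m := by rw [hrdef, List.length_drop]
        intro h; rw [h] at this; simp at this; omega
      have hlL : l.length ≤ n := by
        rw [hldef, List.length_take]
        simp only [hks, List.length_cons] at hlen hm2 ⊢
        omega
      have hrL : r.length ≤ n := by
        rw [hrdef, List.length_drop]
        simp only [hks, List.length_cons] at hlen ⊢
        omega
      have hL := ih l hlL hlne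
      have hR := ih r hrL hrne
      have hml : m = l.length := by rw [hldef, List.length_take]; omega
      have hmr : ks'.length - m = r.length := by rw [hrdef, List.length_drop]
      have hlr : l ++ r = ks' := List.take_append_drop m ks'
      rw [show seg ks' = some (segMerge (l.headI, prefRun l, M l, suffRun l, l.getLastI)
          (r.headI, prefRun r, M r, suffRun r, r.getLastI) m (ks'.length - m)) from by
        rw [hks, seg, ← hks, ← hm, ← hldef, ← hrdef, hL, hR]]
      have e1 : ks'.headI = l.headI := by
        rw [← hlr]; exact headI_append _ _ hlne
      have e2 : ks'.getLastI = r.getLastI := by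
        rw [← hlr]; exact getLastI_append _ _ hrne
      have e3 : prefRun ks' =
          if prefRun l = l.length ∧ l.headI = r.headI then l.length + prefRun r
          else prefRun l := by
        rw [← hlr]; exact prefRun_append _ _ hlne hrne
      have e4 : suffRun ks' =
          if suffRun r = r.length ∧ l.getLastI = r.getLastI then r.length + suffRun l
          else suffRun r := by
        rw [← hlr]; exact suffRun_append _ _ hlne hrne
      have e5 : M ks' =
          if l.getLastI = r.headI
          then max (max (M l) (M r)) ((suffRun l : Int) + (prefRun r : Int))
          else max (M l) (M r) := by
        rw [← hlr]; exact M_append _ _ hlne hrne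
      rw [e1, e2, e3, e4, e5, hmr, hml]
      simp only [segMerge]
      by_cases hout : l.getLastI = r.headI
      · rw [if_pos hout, if_pos hout]
      · rw [if_neg hout, if_neg hout]
        have hpref : ¬ (prefRun l = l.length ∧ l.headI = r.headI) := by
          rintro ⟨h1, h2⟩
          apply hout
          have hall := (prefRun_eq_length_iff l hlne).1 h1
          rw [all_getLastI l.headI l hlne hall]
          exact h2
        have hsuff : ¬ (suffRun r = r.length ∧ l.getLastI = r.getLastI) := by
          rintro ⟨h1, h2⟩
          apply hout
          have hall := (suffRun_eq_length_iff r hrne).1 h1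
          rw [h2, ← all_headI r.getLastI r hrne hall]
        rw [if_neg hpref, if_neg hsuff]

lemma seg_eq (ks : List Char) (hne : ks ≠ []) :
    seg ks = some (ks.headI, prefRun ks, M ks, suffRun ks, ks.getLastI) :=
  seg_eq_aux ks.length ks le_rfl hne

lemma pyGet0_eq (w : String) (h : w ≠ "") :
    PySem.Str.pyGet? w 0 = some (firstKey w) := by
  have hl : w.toList ≠ [] := by simp_all [String.toList_eq_nil_iff]
  cases hw : w.toList with
  | nil => exact absurd hw hl
  | cons c cs => simp [firstKey, PySem.Str.pyGet?, hw]

lemma foldl_step_eq (words : List String) (st : Int × Option Char × Int)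
    (h : ∀ w ∈ words, w ≠ "") :
    words.foldl solveStep st = (words.map firstKey).foldl stepC st := by
  induction words generalizing st with
  | nil => rfl
  | cons w ws ih =>
    have hw : w ≠ "" := h w (by simp)
    simp only [List.foldl, List.map]
    rw [show solveStep st w = stepC st (firstKey w) by
          rw [solveStep, pyGet0_eq w hw]; rfl]
    exact ih _ (fun x hx => h x (by simp [hx]))

lemma foldl_stepC_g (ks : List Char) (s : Int) (cur : Option Char) (l : Int) :
    (let st := ks.foldl stepC (s, cur, l); max st.1 st.2.2) = max s (g cur l ks) := by
  induction ks generalizing s cur l with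
  | nil => rfl
  | cons c ks ih =>
    by_cases hc : some c = cur
    · simp only [List.foldl, stepC, g, hc]
      simpa [hc] using ih s cur (l + 1)
    · simp only [List.foldl, stepC, g, if_neg hc]
      rw [ih]
      omega

lemma g_some (ks : List Char) (c : Char) (l : Int) (hl : 0 ≤ l) :
    g (some c) l ks = max (l + (leadCount c ks : Int)) (M (ks.drop (leadCount c ks))) := by
  induction ks generalizing c l with
  | nil => simp [g, leadCount, M_nil]; omega
  | cons d ks ih =>
    by_cases hd : d = c
    · subst hd
      have hlc : leadCount d (d :: ks) = leadCount d ks + 1 := by simp [leadCount]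
      rw [show g (some d) l (d :: ks) = g (some d) (l + 1) ks from by simp [g],
          ih d (l + 1) (by omega), hlc,
          show List.drop (leadCount d ks + 1) (d :: ks) = List.drop (leadCount d ks) ks from rfl]
      push_cast
      omega
    · rw [show g (some c) l (d :: ks) = max l (g (some d) 1 ks) from by simp [g, hd],
          ih d 1 (by omega),
          show leadCount c (d :: ks) = 0 from by simp [leadCount, hd]]
      rw [List.drop_zero, M_cons]
      push_cast
      omega

lemma g_none (ks : List Char) : max 0 (g none 0 ks) = M ks := by
  cases ks with
  | nil => rw [show g none 0 [] = 0 from rfl, M_nil]; omega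
  | cons c ks =>
    rw [show g none 0 (c :: ks) = max 0 (g (some c) 1 ks) from by simp [g],
        g_some ks c 1 (by omega), M_cons]
    have := M_nonneg (ks.drop (leadCount c ks))
    omega

lemma solve_alt_eq_M (words : List String) : solve_alt words = M (words.map firstKey) := by
  unfold solve_alt
  cases hk : words.map firstKey with
  | nil => simp [seg, M_nil]
  | cons c t => rw [seg_eq (c :: t) (by simp)]

-- ===== VERDICT (by name: the statement is the Claim_ definition above) =====
theorem solve_spec : Claim_equal_solve := by
  intro words _ hpre
  show solve words = solve_alt words
  unfold solve
  rw [solve_alt_eq_M, foldl_step_eq words _ hpre]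
  have h1 := foldl_stepC_g (words.map firstKey) 0 none 0
  simp only at h1
  rw [h1, g_none]
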